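-- pv_equiv track=rewrite | github.com/Shen-Lab/S-REU-2025 | fewshot_with_wildtype.py | get_wildtype_from_row
-- ===== SOURCE A (Python) =====
-- def get_wildtype_from_row(row):
--     seq = list(row["mutated_sequence"])
--     for mut in row["mutant"].split(','):
--         try:
--             wt_aa = mut[0]
--             pos = int(mut[1:-1]) - 1
--             if 0 <= pos < len(seq):
--                 seq[pos] = wt_aa
--         except:
--             continue
--     return ''.join(seq)
-- ===== SOURCE B (Python) =====
-- def get_wildtype_from_row(row):
--     muts = row["mutant"].split(',')
--     seq = row["mutated_sequence"]
--     out = []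
--     for i, c in enumerate(seq):
--         ch = c
--         for mut in reversed(muts):
--             try:
--                 wt = mut[0]
--                 pos = int(mut[1:-1]) - 1
--             except Exception:
--                 continue
--             if pos == i:
--                 ch = wt
--                 break
--         out.append(ch)
--     return ''.join(out)
-- ===== Notes on version B (the rewrite author's own statement) =====
-- stated objective: alternative
-- what changed: B drops the mutable sequence entirely: for each sequence position it scans the mutation tokens in reverse to find the last valid mutation targeting that position (last-write-wins by search order), instead of A's mutation-driven in-place list updates.
import Mathlib
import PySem

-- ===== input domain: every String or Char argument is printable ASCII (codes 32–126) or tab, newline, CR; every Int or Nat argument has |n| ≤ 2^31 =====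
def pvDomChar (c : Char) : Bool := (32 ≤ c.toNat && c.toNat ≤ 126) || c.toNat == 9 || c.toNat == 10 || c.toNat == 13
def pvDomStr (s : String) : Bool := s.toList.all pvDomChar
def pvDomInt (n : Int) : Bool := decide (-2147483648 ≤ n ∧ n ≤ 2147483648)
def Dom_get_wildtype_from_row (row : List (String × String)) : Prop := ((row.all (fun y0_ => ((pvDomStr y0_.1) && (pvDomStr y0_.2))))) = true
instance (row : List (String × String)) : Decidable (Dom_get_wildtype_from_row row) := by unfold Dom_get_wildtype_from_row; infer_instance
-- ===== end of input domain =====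

-- B drops the mutable sequence: per position it searches the token list in reverse for the
-- last valid mutation targeting it (objective: alternative; O(n*m), not faster than A).

-- shared helper: the parse both Pythons do on one token "X<pos>Y" → (wildtype letter, 0-based pos);
-- none exactly where the Python try raises (empty token, non-int middle) and the except skips it.
def pvParseMut (m : List Char) : Option (Char × Int) :=
  match PySem.List.pyGet? m 0 with
  | none => none
  | some wt =>
    match PySem.Int.ofChars? (PySem.List.slice m (some 1) (some (-1))) with
    | none => none
    | some n => some (wt, n - 1)

-- ===== PORT A =====
def pvStepA (seq : List Char) (m : List Char) : List Char :=
  match pvParseMut m with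
  | none => seq
  | some (wt, pos) =>
    if 0 ≤ pos ∧ pos < (seq.length : Int) then PySem.List.pySetD seq pos wt else seq

def get_wildtype_from_row (row : List (String × String)) : String :=
  match (PySem.Dict.mk row).get? "mutated_sequence" with
  | none => ""  -- KeyError; excluded by Pre_
  | some ms =>
    match (PySem.Dict.mk row).get? "mutant" with
    | none => ""  -- KeyError; excluded by Pre_
    | some mutant =>
      String.ofList ((PySem.Chars.splitOn mutant.toList [',']).foldl pvStepA ms.toList)

-- ===== PORT B =====
-- B's inner `for mut in reversed(muts): … if pos == i: ch = wt; break`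
def pvFindRev (k : Int) (muts : List (List Char)) : Option Char :=
  match muts with
  | [] => none
  | m :: rest =>
    match pvParseMut m with
    | none => pvFindRev k rest
    | some (wt, pos) => if pos = k then some wt else pvFindRev k rest

def get_wildtype_from_row_alt (row : List (String × String)) : String :=
  match (PySem.Dict.mk row).get? "mutant" with
  | none => ""  -- KeyError; excluded by Pre_
  | some mutant =>
    match (PySem.Dict.mk row).get? "mutated_sequence" with
    | none => ""  -- KeyError; excluded by Pre_
    | some seq =>
      let muts := PySem.Chars.splitOn mutant.toList [',']
      String.ofList ((PySem.List.enumerate seq.toList).map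
        (fun ic => (pvFindRev ic.1 muts.reverse).getD ic.2))

-- ===== PRECONDITION & SPEC =====
-- A raises KeyError unless the row has both the "mutated_sequence" and the "mutant" key.
def Pre_get_wildtype_from_row (row : List (String × String)) : Prop :=
  ((PySem.Dict.mk row).get? "mutated_sequence").isSome = true ∧
  ((PySem.Dict.mk row).get? "mutant").isSome = true
instance (row : List (String × String)) : Decidable (Pre_get_wildtype_from_row row) := by
  unfold Pre_get_wildtype_from_row; infer_instance

def pvWitness_get_wildtype_from_row : (List (String × String)) :=
  [("mutated_sequence", "ACDE"), ("mutant", "A1C,D3E")]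

def Spec_get_wildtype_from_row (row : List (String × String)) (out : String) : Prop := out = get_wildtype_from_row_alt row
instance (row : List (String × String)) (out : String) : Decidable (Spec_get_wildtype_from_row row out) := by unfold Spec_get_wildtype_from_row; infer_instance

-- ===== CLAIM (what is proved, stated in full; the proofs are below) =====
def Claim_equal_get_wildtype_from_row : Prop := ∀ (row : List (String × String)), Dom_get_wildtype_from_row row → Pre_get_wildtype_from_row row → Spec_get_wildtype_from_row row (get_wildtype_from_row row)

-- ===== LEMMAS AND PROOFS =====

lemma pvStepA_length (seq : List Char) (m : List Char) :
    (pvStepA seq m).length = seq.length := by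
  unfold pvStepA
  cases pvParseMut m with
  | none => rfl
  | some p =>
    obtain ⟨wt, pos⟩ := p
    by_cases h : 0 ≤ pos ∧ pos < (seq.length : Int)
    · simp [h, PySem.List.length_pySetD]
    · simp [h]

lemma pvFoldA_length (muts : List (List Char)) (seq : List Char) :
    (muts.foldl pvStepA seq).length = seq.length := by
  induction muts generalizing seq with
  | nil => rfl
  | cons m rest ih => simp only [List.foldl_cons]; rw [ih, pvStepA_length]

-- A's last-write-wins fold equals B's reverse search, point-wise
lemma pvStepA_none (seq m : List Char) (h : pvParseMut m = none) :
    pvStepA seq m = seq := by simp [pvStepA, h]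

lemma pvStepA_some (seq m : List Char) (wt : Char) (pos : Int)
    (h : pvParseMut m = some (wt, pos)) :
    pvStepA seq m =
      if 0 ≤ pos ∧ pos < (seq.length : Int) then PySem.List.pySetD seq pos wt else seq := by
  simp [pvStepA, h]

lemma pvFindRev_cons_none (k : Int) (m : List Char) (rest : List (List Char))
    (h : pvParseMut m = none) : pvFindRev k (m :: rest) = pvFindRev k rest := by
  simp [pvFindRev, h]

lemma pvFindRev_cons_some (k : Int) (m : List Char) (rest : List (List Char))
    (wt : Char) (pos : Int) (h : pvParseMut m = some (wt, pos)) :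
    pvFindRev k (m :: rest) = if pos = k then some wt else pvFindRev k rest := by
  simp [pvFindRev, h]

lemma pvFold_getD (muts : List (List Char)) (seq : List Char) (k : Nat)
    (hk : k < seq.length) :
    (muts.foldl pvStepA seq).getD k ' ' =
      (pvFindRev (k : Int) muts.reverse).getD (seq.getD k ' ') := by
  induction muts using List.reverseRecOn with
  | nil => rfl
  | append_singleton xs x ih =>
    rw [List.foldl_append, List.foldl_cons, List.foldl_nil, List.reverse_append]
    simp only [List.reverse_cons, List.reverse_nil, List.nil_append, List.singleton_append]
    have hlen : (xs.foldl pvStepA seq).length = seq.length := pvFoldA_length xs seq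
    cases hpx : pvParseMut x with
    | none => rw [pvStepA_none _ _ hpx, pvFindRev_cons_none _ _ _ hpx]; exact ih
    | some p =>
      obtain ⟨wt, pos⟩ := p
      rw [pvStepA_some _ _ _ _ hpx, pvFindRev_cons_some _ _ _ _ _ hpx]
      by_cases hpk : pos = (k : Int)
      · have hb : 0 ≤ pos ∧ pos < ((xs.foldl pvStepA seq).length : Int) := by
          constructor <;> omega
        rw [if_pos hb, if_pos hpk]
        rw [PySem.List.pySetD_of_nonneg _ _ hb.1]
        have hklt : pos.toNat < (xs.foldl pvStepA seq).length := by omega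
        have hek : pos.toNat = k := by omega
        have hklt' : k < (xs.foldl pvStepA seq).length := hek ▸ hklt
        simp [List.getD, hek, List.getElem?_set, hklt']
      · rw [if_neg hpk]
        by_cases hb : 0 ≤ pos ∧ pos < ((xs.foldl pvStepA seq).length : Int)
        · rw [if_pos hb]
          rw [PySem.List.pySetD_of_nonneg _ _ hb.1]
          have hne : pos.toNat ≠ k := by omega
          rw [← ih]
          simp [List.getD, hne]
        · rw [if_neg hb]; exact ih

lemma pvResult_eq (muts : List (List Char)) (seq0 : List Char) :
    muts.foldl pvStepA seq0 =
      (PySem.List.enumerate seq0).map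
        (fun ic => (pvFindRev ic.1 muts.reverse).getD ic.2) := by
  apply List.ext_getElem
  · simp [pvFoldA_length, PySem.List.length_enumerate]
  · intro k h1 h2
    have hk : k < seq0.length := by
      have := PySem.List.length_enumerate (xs := seq0) (s := 0)
      simp [this] at h2; omega
    have := pvFold_getD muts seq0 k hk
    simp only [List.getD, List.getElem?_eq_getElem h1,
      List.getElem?_eq_getElem hk, Option.getD_some] at this
    simp only [List.getElem_map, PySem.List.getElem_enumerate]
    simpa using this

-- ===== VERDICT (by name: the statement is the Claim_ definition above) =====
theorem get_wildtype_from_row_spec : Claim_equal_get_wildtype_from_row := by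
  intro row _hdom hpre
  unfold Spec_get_wildtype_from_row get_wildtype_from_row get_wildtype_from_row_alt
  obtain ⟨h1, h2⟩ := hpre
  obtain ⟨ms, hms⟩ := Option.isSome_iff_exists.mp h1
  obtain ⟨mu, hmu⟩ := Option.isSome_iff_exists.mp h2
  rw [hms, hmu]
  exact congrArg String.ofList (pvResult_eq (PySem.Chars.splitOn mu.toList [',']) ms.toList)
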